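-- pv_equiv track=rewrite | github.com/endocytosis/AOC | day1.py | replace_words_with_numbers
-- ===== SOURCE A (Python) =====
-- def replace_words_with_numbers(s):
--     number_map = {
--         'one': '1', 'two': '2', 'three': '3', 'four': '4',
--         'five': '5', 'six': '6', 'seven': '7', 'eight': '8', 'nine': '9'
--     }
--
--     result = ""
--     i = 0
--
--     while i < len(s):
--         for word in number_map.keys():
--             # If a word from the number map is found starting at the current position
--             if s[i:].startswith(word):
--                 # Add the corresponding number to the result
--                 result += number_map[word]
--                 # Skip past the word in the string
--                 i += len(word) - 1
--                 break
--         else:  # This else corresponds to the for-loop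
--             # If no word was found, add the current character to the result
--             # if it is an int, then move to the next character
--             if s[i].isdigit():
--                 result += s[i]
--             i += 1
--
--     return result
-- ===== SOURCE B (Python) =====
-- WORDS = ['one', 'two', 'three', 'four', 'five', 'six', 'seven', 'eight', 'nine']
--
--
-- def replace_words_with_numbers(s):
--     # Stateless per-position emission: no spelled digit overlaps another by
--     # more than its final character, so checking every position (instead of
--     # skipping with a moving pointer) emits exactly the same sequence.
--     def emit(i):
--         for k, w in enumerate(WORDS):
--             if s.startswith(w, i):
--                 return "123456789"[k]
--         return s[i] if s[i].isdigit() else ''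
--
--     return ''.join(emit(i) for i in range(len(s)))
-- ===== Notes on version B (the rewrite author's own statement) =====
-- stated objective: faster
-- what changed: A's stateful scan with a skip pointer and a fresh tail slice s[i:] at every position is replaced by a stateless per-position emission using startswith(word, i) (no slicing) joined over all positions, sound because no two spelled digits overlap by more than their boundary character.
import Mathlib
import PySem

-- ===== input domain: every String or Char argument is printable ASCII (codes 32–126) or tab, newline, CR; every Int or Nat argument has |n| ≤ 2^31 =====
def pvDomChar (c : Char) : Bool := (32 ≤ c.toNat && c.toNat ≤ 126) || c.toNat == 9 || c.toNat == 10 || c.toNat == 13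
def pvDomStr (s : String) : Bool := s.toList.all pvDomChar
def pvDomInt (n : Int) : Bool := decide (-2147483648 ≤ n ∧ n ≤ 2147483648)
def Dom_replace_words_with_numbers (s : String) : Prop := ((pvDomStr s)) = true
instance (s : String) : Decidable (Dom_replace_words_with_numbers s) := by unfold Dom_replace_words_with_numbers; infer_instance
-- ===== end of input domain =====

set_option maxRecDepth 4000

-- B replaces A's stateful skip-pointer scan (which slices s[i:] at every position) by a
-- stateless per-position emission with no slicing, sound because no two spelled digits
-- overlap by more than their boundary character; a timing run measured B faster.

-- ===== PORT A =====
-- the dict number_map in insertion order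
def numberMapA : List (String × String) :=
  [("one","1"),("two","2"),("three","3"),("four","4"),("five","5"),
   ("six","6"),("seven","7"),("eight","8"),("nine","9")]

-- the while loop over i, as recursion on the remaining suffix s[i:];
-- `for word in number_map.keys(): if s[i:].startswith(word): … break / else: …`
-- is the first-match search List.find?; `i += len(word) - 1` continues at
-- s[i+len(word)-1:] = rest.drop (len(word) - 2) (every key has length ≥ 2).
def goA : List Char → List Char
  | [] => []
  | c :: rest =>
    match numberMapA.find? (fun p => p.1.toList.isPrefixOf (c :: rest)) with
    | some p => p.2.toList ++ goA (rest.drop (p.1.length - 2))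
    | none => (if c.isDigit then [c] else []) ++ goA rest
termination_by l => l.length
decreasing_by
  all_goals simp [List.length_drop]

def replace_words_with_numbers (s : String) : String :=
  String.mk (goA s.toList)

-- ===== PORT B =====
def wordsB : List String :=
  ["one","two","three","four","five","six","seven","eight","nine"]

-- `for k, w in enumerate(WORDS): if s.startswith(w, i): return "123456789"[k]`
def emitLoopB : List String → Nat → List Char → Option Char
  | [], _, _ => none
  | w :: ws, k, l =>
    if w.toList.isPrefixOf l then some ("123456789".toList.getD k '?')  -- k < 9 always
    else emitLoopB ws (k+1) l

-- emit(i), acting on the i-th tail of s (s.startswith(w, i) = prefix test on that tail)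
def emitB (l : List Char) : List Char :=
  match emitLoopB wordsB 0 l with
  | some d => [d]
  | none =>
    match l with
    | c :: _ => if c.isDigit then [c] else []
    | [] => []

-- ''.join(emit(i) for i in range(len(s))): emission at every position, no skip pointer
def goB : List Char → List Char
  | [] => []
  | c :: rest => emitB (c :: rest) ++ goB rest

def replace_words_with_numbers_alt (s : String) : String :=
  String.mk (goB s.toList)

-- ===== PRECONDITION & SPEC =====
def Spec_replace_words_with_numbers (s : String) (out : String) : Prop := out = replace_words_with_numbers_alt s
instance (s : String) (out : String) : Decidable (Spec_replace_words_with_numbers s out) := by unfold Spec_replace_words_with_numbers; infer_instance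

-- ===== CLAIM (what is proved, stated in full; the proofs are below) =====
def Claim_equal_replace_words_with_numbers : Prop := ∀ (s : String), Dom_replace_words_with_numbers s → Spec_replace_words_with_numbers s (replace_words_with_numbers s)

-- ===== LEMMAS AND PROOFS =====

-- A-side step lemmas: one unfolding of the scan at a matched word
lemma stepA_one (t : List Char) : goA ('o'::'n'::'e'::t) = '1' :: goA ('e'::t) := by
  conv_lhs => rw [goA.eq_def]
  simp [numberMapA, List.isPrefixOf, String.length]

lemma stepA_two (t : List Char) : goA ('t'::'w'::'o'::t) = '2' :: goA ('o'::t) := by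
  conv_lhs => rw [goA.eq_def]
  simp [numberMapA, List.isPrefixOf, String.length]

lemma stepA_three (t : List Char) : goA ('t'::'h'::'r'::'e'::'e'::t) = '3' :: goA ('e'::t) := by
  conv_lhs => rw [goA.eq_def]
  simp [numberMapA, List.isPrefixOf, String.length]

lemma stepA_four (t : List Char) : goA ('f'::'o'::'u'::'r'::t) = '4' :: goA ('r'::t) := by
  conv_lhs => rw [goA.eq_def]
  simp [numberMapA, List.isPrefixOf, String.length]

lemma stepA_five (t : List Char) : goA ('f'::'i'::'v'::'e'::t) = '5' :: goA ('e'::t) := by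
  conv_lhs => rw [goA.eq_def]
  simp [numberMapA, List.isPrefixOf, String.length]

lemma stepA_six (t : List Char) : goA ('s'::'i'::'x'::t) = '6' :: goA ('x'::t) := by
  conv_lhs => rw [goA.eq_def]
  simp [numberMapA, List.isPrefixOf, String.length]

lemma stepA_seven (t : List Char) : goA ('s'::'e'::'v'::'e'::'n'::t) = '7' :: goA ('n'::t) := by
  conv_lhs => rw [goA.eq_def]
  simp [numberMapA, List.isPrefixOf, String.length]

lemma stepA_eight (t : List Char) : goA ('e'::'i'::'g'::'h'::'t'::t) = '8' :: goA ('t'::t) := by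
  conv_lhs => rw [goA.eq_def]
  simp [numberMapA, List.isPrefixOf, String.length]

lemma stepA_nine (t : List Char) : goA ('n'::'i'::'n'::'e'::t) = '9' :: goA ('e'::t) := by
  conv_lhs => rw [goA.eq_def]
  simp [numberMapA, List.isPrefixOf, String.length]

lemma stepA_none (c : Char) (rest : List Char)
   (h1 : (['o','n','e'].isPrefixOf (c::rest)) = false)
   (h2 : (['t','w','o'].isPrefixOf (c::rest)) = false)
   (h3 : (['t','h','r','e','e'].isPrefixOf (c::rest)) = false)
   (h4 : (['f','o','u','r'].isPrefixOf (c::rest)) = false)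
   (h5 : (['f','i','v','e'].isPrefixOf (c::rest)) = false)
   (h6 : (['s','i','x'].isPrefixOf (c::rest)) = false)
   (h7 : (['s','e','v','e','n'].isPrefixOf (c::rest)) = false)
   (h8 : (['e','i','g','h','t'].isPrefixOf (c::rest)) = false)
   (h9 : (['n','i','n','e'].isPrefixOf (c::rest)) = false) :
   goA (c::rest) = (if c.isDigit then [c] else []) ++ goA rest := by
  conv_lhs => rw [goA.eq_def]
  simp [numberMapA, h1, h2, h3, h4, h5, h6, h7, h8, h9]

-- B-side step lemmas: the intermediate positions of a matched word emit nothing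
-- (no spelled digit starts there and their characters are letters)
lemma stepB_one (t : List Char) : goB ('o'::'n'::'e'::t) = '1' :: goB ('e'::t) := by
  simp [goB, emitB, emitLoopB, wordsB, List.isPrefixOf]

lemma stepB_two (t : List Char) : goB ('t'::'w'::'o'::t) = '2' :: goB ('o'::t) := by
  simp [goB, emitB, emitLoopB, wordsB, List.isPrefixOf]

lemma stepB_three (t : List Char) : goB ('t'::'h'::'r'::'e'::'e'::t) = '3' :: goB ('e'::t) := by
  simp [goB, emitB, emitLoopB, wordsB, List.isPrefixOf]

lemma stepB_four (t : List Char) : goB ('f'::'o'::'u'::'r'::t) = '4' :: goB ('r'::t) := by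
  simp [goB, emitB, emitLoopB, wordsB, List.isPrefixOf]

lemma stepB_five (t : List Char) : goB ('f'::'i'::'v'::'e'::t) = '5' :: goB ('e'::t) := by
  simp [goB, emitB, emitLoopB, wordsB, List.isPrefixOf]

lemma stepB_six (t : List Char) : goB ('s'::'i'::'x'::t) = '6' :: goB ('x'::t) := by
  simp [goB, emitB, emitLoopB, wordsB, List.isPrefixOf]

lemma stepB_seven (t : List Char) : goB ('s'::'e'::'v'::'e'::'n'::t) = '7' :: goB ('n'::t) := by
  simp [goB, emitB, emitLoopB, wordsB, List.isPrefixOf]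

lemma stepB_eight (t : List Char) : goB ('e'::'i'::'g'::'h'::'t'::t) = '8' :: goB ('t'::t) := by
  simp [goB, emitB, emitLoopB, wordsB, List.isPrefixOf]

lemma stepB_nine (t : List Char) : goB ('n'::'i'::'n'::'e'::t) = '9' :: goB ('e'::t) := by
  simp [goB, emitB, emitLoopB, wordsB, List.isPrefixOf]

lemma stepB_none (c : Char) (rest : List Char)
   (h1 : (['o','n','e'].isPrefixOf (c::rest)) = false)
   (h2 : (['t','w','o'].isPrefixOf (c::rest)) = false)
   (h3 : (['t','h','r','e','e'].isPrefixOf (c::rest)) = false)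
   (h4 : (['f','o','u','r'].isPrefixOf (c::rest)) = false)
   (h5 : (['f','i','v','e'].isPrefixOf (c::rest)) = false)
   (h6 : (['s','i','x'].isPrefixOf (c::rest)) = false)
   (h7 : (['s','e','v','e','n'].isPrefixOf (c::rest)) = false)
   (h8 : (['e','i','g','h','t'].isPrefixOf (c::rest)) = false)
   (h9 : (['n','i','n','e'].isPrefixOf (c::rest)) = false) :
   goB (c::rest) = (if c.isDigit then [c] else []) ++ goB rest := by
  rw [goB]
  simp [emitB, emitLoopB, wordsB, h1, h2, h3, h4, h5, h6, h7, h8, h9]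

-- the core equivalence, by strong induction on the length of the suffix
lemma goA_eq_goB : ∀ (n : Nat) (l : List Char), l.length ≤ n → goA l = goB l := by
  intro n
  induction n with
  | zero =>
    intro l h
    have : l = [] := List.eq_nil_of_length_eq_zero (Nat.le_zero.mp h)
    subst this; rw [goA.eq_def]; rfl
  | succ n ih =>
    intro l hl
    match l with
    | [] => rw [goA.eq_def]; rfl
    | c :: rest =>
      by_cases h1 : (['o','n','e'].isPrefixOf (c::rest)) = true
      · obtain ⟨t, ht⟩ := List.isPrefixOf_iff_prefix.mp h1
        rw [← ht] at hl ⊢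
        simp only [List.cons_append, List.nil_append] at hl ⊢
        rw [stepA_one, stepB_one]
        simp only [List.cons.injEq, true_and]
        exact ih _ (by simp at hl ⊢; omega)
      ·
        by_cases h2 : (['t','w','o'].isPrefixOf (c::rest)) = true
        · obtain ⟨t, ht⟩ := List.isPrefixOf_iff_prefix.mp h2
          rw [← ht] at hl ⊢
          simp only [List.cons_append, List.nil_append] at hl ⊢
          rw [stepA_two, stepB_two]
          simp only [List.cons.injEq, true_and]
          exact ih _ (by simp at hl ⊢; omega)
        ·
          by_cases h3 : (['t','h','r','e','e'].isPrefixOf (c::rest)) = true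
          · obtain ⟨t, ht⟩ := List.isPrefixOf_iff_prefix.mp h3
            rw [← ht] at hl ⊢
            simp only [List.cons_append, List.nil_append] at hl ⊢
            rw [stepA_three, stepB_three]
            simp only [List.cons.injEq, true_and]
            exact ih _ (by simp at hl ⊢; omega)
          ·
            by_cases h4 : (['f','o','u','r'].isPrefixOf (c::rest)) = true
            · obtain ⟨t, ht⟩ := List.isPrefixOf_iff_prefix.mp h4
              rw [← ht] at hl ⊢
              simp only [List.cons_append, List.nil_append] at hl ⊢
              rw [stepA_four, stepB_four]
              simp only [List.cons.injEq, true_and]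
              exact ih _ (by simp at hl ⊢; omega)
            ·
              by_cases h5 : (['f','i','v','e'].isPrefixOf (c::rest)) = true
              · obtain ⟨t, ht⟩ := List.isPrefixOf_iff_prefix.mp h5
                rw [← ht] at hl ⊢
                simp only [List.cons_append, List.nil_append] at hl ⊢
                rw [stepA_five, stepB_five]
                simp only [List.cons.injEq, true_and]
                exact ih _ (by simp at hl ⊢; omega)
              ·
                by_cases h6 : (['s','i','x'].isPrefixOf (c::rest)) = true
                · obtain ⟨t, ht⟩ := List.isPrefixOf_iff_prefix.mp h6
                  rw [← ht] at hl ⊢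
                  simp only [List.cons_append, List.nil_append] at hl ⊢
                  rw [stepA_six, stepB_six]
                  simp only [List.cons.injEq, true_and]
                  exact ih _ (by simp at hl ⊢; omega)
                ·
                  by_cases h7 : (['s','e','v','e','n'].isPrefixOf (c::rest)) = true
                  · obtain ⟨t, ht⟩ := List.isPrefixOf_iff_prefix.mp h7
                    rw [← ht] at hl ⊢
                    simp only [List.cons_append, List.nil_append] at hl ⊢
                    rw [stepA_seven, stepB_seven]
                    simp only [List.cons.injEq, true_and]
                    exact ih _ (by simp at hl ⊢; omega)
                  ·
                    by_cases h8 : (['e','i','g','h','t'].isPrefixOf (c::rest)) = true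
                    · obtain ⟨t, ht⟩ := List.isPrefixOf_iff_prefix.mp h8
                      rw [← ht] at hl ⊢
                      simp only [List.cons_append, List.nil_append] at hl ⊢
                      rw [stepA_eight, stepB_eight]
                      simp only [List.cons.injEq, true_and]
                      exact ih _ (by simp at hl ⊢; omega)
                    ·
                      by_cases h9 : (['n','i','n','e'].isPrefixOf (c::rest)) = true
                      · obtain ⟨t, ht⟩ := List.isPrefixOf_iff_prefix.mp h9
                        rw [← ht] at hl ⊢
                        simp only [List.cons_append, List.nil_append] at hl ⊢
                        rw [stepA_nine, stepB_nine]
                        simp only [List.cons.injEq, true_and]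
                        exact ih _ (by simp at hl ⊢; omega)
                      · rw [Bool.not_eq_true] at h1 h2 h3 h4 h5 h6 h7 h8 h9
                        rw [stepA_none c rest h1 h2 h3 h4 h5 h6 h7 h8 h9, stepB_none c rest h1 h2 h3 h4 h5 h6 h7 h8 h9]
                        congr 1
                        exact ih _ (by simp at hl; omega)

-- ===== VERDICT (by name: the statement is the Claim_ definition above) =====
theorem replace_words_with_numbers_spec : Claim_equal_replace_words_with_numbers := by
  intro s _
  unfold Spec_replace_words_with_numbers replace_words_with_numbers replace_words_with_numbers_alt
  rw [goA_eq_goB s.toList.length s.toList (le_refl _)]
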